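-- pv_equiv track=rewrite | github.com/betterzian/PrivacyGuard | privacyguard/infrastructure/pii/rule_based_detector.py | _merge_candidate_metadata
-- ===== SOURCE A (Python) =====
-- def _merge_candidate_metadata(
--
--     left: dict[str, list[str]] | None,
--     right: dict[str, list[str]] | None,
-- ) -> dict[str, list[str]]:
--     merged: dict[str, list[str]] = {}
--     for source in (left or {}, right or {}):
--         for key, values in source.items():
--             merged[key] = sorted(set(merged.get(key, [])) | set(values))
--     return merged
-- ===== SOURCE B (Python) =====
-- def _merge_candidate_metadata(left, right):
--     left = left or {}
--     right = right or {}
--     merged = {}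
--     for key in [*left, *(k for k in right if k not in left)]:
--         combined = sorted(left.get(key, []) + right.get(key, []))
--         vals = []
--         for v in combined:
--             if not vals or vals[-1] != v:
--                 vals.append(v)
--         merged[key] = vals
--     return merged
-- ===== Notes on version B (the rewrite author's own statement) =====
-- stated objective: alternative
-- what changed: Replaces A's source-by-source accumulation with set-union-then-sort per key by: compute the final key order once (left keys, then right keys not in left), and for each key sort the concatenation left.get(k,[])+right.get(k,[]) and remove adjacent duplicates in one scan - no sets, each key handled exactly once.
import Mathlib
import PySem

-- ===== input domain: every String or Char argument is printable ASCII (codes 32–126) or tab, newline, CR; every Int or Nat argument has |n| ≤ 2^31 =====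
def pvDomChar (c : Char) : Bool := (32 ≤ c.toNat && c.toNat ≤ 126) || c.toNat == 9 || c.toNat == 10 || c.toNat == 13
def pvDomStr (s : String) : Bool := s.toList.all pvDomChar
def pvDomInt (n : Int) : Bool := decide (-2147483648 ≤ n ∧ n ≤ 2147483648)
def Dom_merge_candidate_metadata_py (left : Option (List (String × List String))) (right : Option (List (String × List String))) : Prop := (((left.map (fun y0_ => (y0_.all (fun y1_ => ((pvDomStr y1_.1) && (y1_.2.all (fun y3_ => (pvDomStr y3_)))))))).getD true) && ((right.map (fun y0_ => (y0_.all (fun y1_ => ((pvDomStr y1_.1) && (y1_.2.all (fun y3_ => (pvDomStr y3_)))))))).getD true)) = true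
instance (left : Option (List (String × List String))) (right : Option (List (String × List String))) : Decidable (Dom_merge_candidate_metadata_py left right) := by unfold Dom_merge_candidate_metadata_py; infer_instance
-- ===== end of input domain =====

-- B computes the final key order once (left's keys, then right's new keys) and, per key, sorts the
-- concatenation of the two value lists and removes adjacent duplicates in one scan — no sets,
-- each key handled exactly once (A accumulates source by source with sorted set-unions).

-- ===== PORT A =====
-- A's leaf: sorted(set(a) | set(b))
def pvSortedUnion (a b : List String) : List String :=
  PySem.List.sorted (PySem.Set.union (PySem.Set.ofList a) (PySem.Set.ofList b)) (fun x => x) false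

def merge_candidate_metadata_py (left : Option (List (String × List String))) (right : Option (List (String × List String))) : List (String × List String) :=
  -- merged = {}; for source in (left or {}, right or {}): for key, values in source.items(): merged[key] = sorted(set(merged.get(key, [])) | set(values))
  let merged : PySem.Dict String (List String) :=
    [left.getD [], right.getD []].foldl
      (fun merged source =>
        source.foldl (fun m kv => m.insert kv.1 (pvSortedUnion (m.getD kv.1 []) kv.2)) merged)
      PySem.Dict.empty
  merged.items

-- ===== PORT B =====
-- B's leaf: combined = sorted(a + b); vals = []; for v in combined: if not vals or vals[-1] != v: vals.append(v)
-- ('not vals or vals[-1] != v' is exactly 'vals.getLast? ≠ some v')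
def pvSortDedup (a b : List String) : List String :=
  let combined := PySem.List.sorted (a ++ b) (fun x => x) false
  combined.foldl (fun vals v => if vals.getLast? = some v then vals else vals ++ [v]) []

def merge_candidate_metadata_py_alt (left : Option (List (String × List String))) (right : Option (List (String × List String))) : List (String × List String) :=
  let l : PySem.Dict String (List String) := PySem.Dict.mk (left.getD [])
  let r : PySem.Dict String (List String) := PySem.Dict.mk (right.getD [])
  -- for key in [*left, *(k for k in right if k not in left)]:
  let keys := l.keys ++ r.keys.filter (fun k => !(l.contains k))
  let merged : PySem.Dict String (List String) :=
    keys.foldl (fun m key => m.insert key (pvSortDedup (l.getD key []) (r.getD key []))) PySem.Dict.empty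
  merged.items

-- ===== PRECONDITION & SPEC =====
-- Pre_ requires distinct keys in each association list: the Python arguments are dicts, which cannot
-- contain duplicate keys, so association lists with repeated keys correspond to no Python input.
def Pre_merge_candidate_metadata_py (left : Option (List (String × List String))) (right : Option (List (String × List String))) : Prop :=
  ((left.getD []).map Prod.fst).Nodup ∧ ((right.getD []).map Prod.fst).Nodup
instance (left : Option (List (String × List String))) (right : Option (List (String × List String))) : Decidable (Pre_merge_candidate_metadata_py left right) := by unfold Pre_merge_candidate_metadata_py; infer_instance
def pvWitness_merge_candidate_metadata_py : (Option (List (String × List String))) × (Option (List (String × List String))) :=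
  (some [("a", ["y", "x"]), ("b", ["z"])], some [("a", ["x", "w"])])
def Spec_merge_candidate_metadata_py (left : Option (List (String × List String))) (right : Option (List (String × List String))) (out : List (String × List String)) : Prop := out = merge_candidate_metadata_py_alt left right
instance (left : Option (List (String × List String))) (right : Option (List (String × List String))) (out : List (String × List String)) : Decidable (Spec_merge_candidate_metadata_py left right out) := by unfold Spec_merge_candidate_metadata_py; infer_instance

-- ===== CLAIM (what is proved, stated in full; the proofs are below) =====
def Claim_equal_merge_candidate_metadata_py : Prop := ∀ (left : Option (List (String × List String))) (right : Option (List (String × List String))), Dom_merge_candidate_metadata_py left right → Pre_merge_candidate_metadata_py left right → Spec_merge_candidate_metadata_py left right (merge_candidate_metadata_py left right)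

-- ===== LEMMAS AND PROOFS =====

-- in a strictly increasing list every element is ≤ the last one
lemma pvLeGetLast : ∀ (l : List String), l.Pairwise (· < ·) → ∀ z, l.getLast? = some z → ∀ y ∈ l, y ≤ z := by
  intro l
  induction l with
  | nil => intro _ z hz; simp at hz
  | cons x t ih =>
    intro hp z hz y hy
    by_cases ht : t = []
    · subst ht
      simp only [List.getLast?_singleton, Option.some.injEq] at hz
      simp only [List.mem_singleton] at hy
      simp [hy, hz]
    · have hz' : t.getLast? = some z := by
        rw [List.getLast?_cons] at hz
        rcases htl : t.getLast? with _ | w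
        · rw [List.getLast?_eq_none_iff] at htl; exact absurd htl ht
        · rw [htl] at hz; simpa using hz
      rcases List.mem_cons.mp hy with rfl | hyt
      · exact le_of_lt ((List.pairwise_cons.mp hp).1 z (List.mem_of_getLast? hz'))
      · exact ih (List.pairwise_cons.mp hp).2 z hz' y hyt

-- B's adjacent-dedup scan over a ≤-sorted list: the result is strictly increasing with the same elements
lemma pvDedupFold : ∀ (s acc : List String), s.Pairwise (· ≤ ·) → acc.Pairwise (· < ·) →
    (∀ y ∈ acc, ∀ x ∈ s, y ≤ x) →
    (s.foldl (fun vals v => if vals.getLast? = some v then vals else vals ++ [v]) acc).Pairwise (· < ·)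
    ∧ ∀ x, (x ∈ s.foldl (fun vals v => if vals.getLast? = some v then vals else vals ++ [v]) acc ↔ x ∈ acc ∨ x ∈ s) := by
  intro s
  induction s with
  | nil => intro acc _ ha _; simpa using ha
  | cons v t ih =>
    intro acc hs ha hle
    have hst := List.pairwise_cons.mp hs
    simp only [List.foldl_cons]
    by_cases hlast : acc.getLast? = some v
    · rw [if_pos hlast]
      have hv : v ∈ acc := List.mem_of_getLast? hlast
      obtain ⟨h1, h2⟩ := ih acc hst.2 ha (fun y hy x hx => hle y hy x (List.mem_cons_of_mem _ hx))
      refine ⟨h1, fun x => ?_⟩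
      rw [h2 x]
      constructor
      · rintro (h | h)
        · exact Or.inl h
        · exact Or.inr (List.mem_cons_of_mem _ h)
      · rintro (h | h)
        · exact Or.inl h
        · rcases List.mem_cons.mp h with rfl | h
          · exact Or.inl hv
          · exact Or.inr h
    · rw [if_neg hlast]
      have hacc' : (acc ++ [v]).Pairwise (· < ·) := by
        rw [List.pairwise_append]
        refine ⟨ha, List.pairwise_singleton _ _, ?_⟩
        intro y hy x hx
        rw [List.mem_singleton] at hx
        rw [hx]
        have hyv : y ≤ v := hle y hy v List.mem_cons_self
        rcases lt_or_eq_of_le hyv with h | rfl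
        · exact h
        · -- y = v ∈ acc but last ≠ v: contradiction with ≤-last
          exfalso
          have hne : acc ≠ [] := by rintro rfl; simp at hy
          obtain ⟨z, hz⟩ := List.getLast?_isSome.mpr hne |> Option.isSome_iff_exists.mp
          have hyz : y ≤ z := pvLeGetLast acc ha z hz y hy
          have hzy : z ≤ y := hle z (List.mem_of_getLast? hz) y List.mem_cons_self
          exact hlast ((le_antisymm hzy hyz) ▸ hz)
      have hle' : ∀ y ∈ acc ++ [v], ∀ x ∈ t, y ≤ x := by
        intro y hy x hx
        rcases List.mem_append.mp hy with h | h
        · exact hle y h x (List.mem_cons_of_mem _ hx)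
        · rw [List.mem_singleton] at h; subst h
          exact hst.1 x hx
      obtain ⟨h1, h2⟩ := ih (acc ++ [v]) hst.2 hacc' hle'
      refine ⟨h1, fun x => ?_⟩
      rw [h2 x]
      simp [List.mem_append, List.mem_cons, or_assoc]

-- B's leaf equals A's leaf
lemma pvSortDedup_eq (a b : List String) : pvSortDedup a b = pvSortedUnion a b := by
  unfold pvSortDedup pvSortedUnion
  set s := PySem.List.sorted (a ++ b) (fun x => x) false with hs
  have hsp : s.Pairwise (· ≤ ·) := PySem.List.sorted_pairwise (a ++ b) (fun x => x)
  obtain ⟨h1, h2⟩ := pvDedupFold s [] hsp (List.Pairwise.nil) (by intro y hy; simp at hy)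
  set R := s.foldl (fun vals v => if vals.getLast? = some v then vals else vals ++ [v]) [] with hR
  symm
  apply PySem.List.sorted_eq_of_perm_of_pairwise_lt
  · -- R.Perm (Set.union ...)
    have hnodupR : R.Nodup := h1.nodup
    have hnodupU : (PySem.Set.union (PySem.Set.ofList a) (PySem.Set.ofList b)).Nodup :=
      PySem.Set.nodup_union _ _ (PySem.Set.nodup_ofList a)
    rw [List.perm_ext_iff_of_nodup hnodupR hnodupU]
    intro x
    rw [h2 x]
    simp [PySem.Set.mem_union, PySem.Set.mem_ofList, PySem.List.mem_sorted, List.mem_append, hs]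
  · exact h1

-- sorted(set(a)|set(b)) depends on a only through the set of a's elements
lemma pvSortedUnion_nil (a : List String) :
    pvSortedUnion [] a = PySem.List.sorted (PySem.Set.ofList a) (fun x => x) false := by
  unfold pvSortedUnion
  have h1 : PySem.Set.ofList ([] : List String) = ([] : List String) := rfl
  rw [h1]
  have h2 : PySem.Set.union ([] : PySem.Set String) (PySem.Set.ofList a) = PySem.Set.ofList (PySem.Set.ofList a) := by
    simp [PySem.Set.union, PySem.Set.update_nil_left]
  rw [h2, PySem.Set.ofList_ofList]

lemma pvSortedUnion_nil_right (a : List String) :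
    pvSortedUnion a [] = PySem.List.sorted (PySem.Set.ofList a) (fun x => x) false := by
  rfl

lemma pvSortedUnion_idem (a b : List String) :
    pvSortedUnion (pvSortedUnion [] a) b = pvSortedUnion a b := by
  rw [pvSortedUnion_nil]
  unfold pvSortedUnion
  have hnd : (PySem.List.sorted (PySem.Set.ofList a) (fun x => x) false).Nodup :=
    ((PySem.List.sorted_perm (PySem.Set.ofList a) (fun x => x) false).symm.nodup
      (PySem.Set.nodup_ofList a))
  rw [PySem.Set.ofList_eq_self_of_nodup _ hnd]
  apply PySem.List.sorted_eq_sorted_of_perm _ _ _ Function.injective_id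
  rw [List.perm_ext_iff_of_nodup
    (PySem.Set.nodup_union _ _ hnd)
    (PySem.Set.nodup_union _ _ (PySem.Set.nodup_ofList a))]
  intro x
  simp [PySem.Set.mem_union, PySem.List.mem_sorted, PySem.Set.mem_ofList]

-- membership-style facts about a literal association dict
lemma pvContainsMk (x : List (String × List String)) (y : String) :
    (PySem.Dict.mk x).contains y = decide (y ∈ x.map Prod.fst) := by
  rw [PySem.Dict.contains_eq_decide_mem_keys, PySem.Dict.keys_mk]

lemma pvGetDMkCons (k y : String) (v : List String) (t : List (String × List String)) :
    (PySem.Dict.mk ((k, v) :: t)).getD y [] = if k = y then v else (PySem.Dict.mk t).getD y [] := by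
  rw [PySem.Dict.getD_eq_get?_getD, PySem.Dict.getD_eq_get?_getD, PySem.Dict.get?_mk_cons]
  by_cases h : k = y <;> simp [h]

-- the per-source loop of A, characterised on a dict with distinct keys
lemma pvFoldIns (r : List (String × List String)) :
    ∀ (d : PySem.Dict String (List String)), d.keys.Nodup → (r.map Prod.fst).Nodup →
    (r.foldl (fun m kv => m.insert kv.1 (pvSortedUnion (m.getD kv.1 []) kv.2)) d).items
      = d.items.map (fun q => if (PySem.Dict.mk r).contains q.1
            then (q.1, pvSortedUnion q.2 ((PySem.Dict.mk r).getD q.1 []))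
            else q)
        ++ (r.filter (fun p => !(d.contains p.1))).map (fun p => (p.1, pvSortedUnion [] p.2)) := by
  induction r with
  | nil =>
    intro d _ _
    simp
  | cons kv t ih =>
    intro d hd hr
    obtain ⟨k, v⟩ := kv
    simp only [List.map_cons, List.nodup_cons] at hr
    have hkt : k ∉ t.map Prod.fst := hr.1
    have htnd : (t.map Prod.fst).Nodup := hr.2
    have hcont_t_k : (PySem.Dict.mk t).contains k = false := by
      rw [pvContainsMk]; simpa using hkt
    simp only [List.foldl_cons]
    rw [ih _ (PySem.Dict.nodup_keys_insert _ _ _ hd) htnd]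
    have hfilter : ∀ p ∈ t, ((d.insert k (pvSortedUnion (d.getD k []) v)).contains p.1 = d.contains p.1) := by
      intro p hp
      rw [PySem.Dict.contains_insert]
      have : p.1 ≠ k := by
        intro h; exact hkt (h ▸ List.mem_map_of_mem hp)
      simp [this]
    have hfeq : t.filter (fun p => !(d.insert k (pvSortedUnion (d.getD k []) v)).contains p.1)
        = t.filter (fun p => !(d.contains p.1)) := by
      apply List.filter_congr; intro p hp; rw [hfilter p hp]
    by_cases hc : d.contains k = true
    · rw [PySem.Dict.items_insert_of_contains _ _ hc]
      have hhead : (((k, v) :: t).filter (fun p => !(d.contains p.1))) = t.filter (fun p => !(d.contains p.1)) := by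
        simp [hc]
      rw [hfeq, hhead, List.map_map]
      congr 1
      apply List.map_congr_left
      intro q hq
      by_cases hqk : q.1 = k
      · have hmem : (k, q.2) ∈ d.items := by rw [← hqk]; exact hq
        have hq2 : d.getD k [] = q.2 := PySem.Dict.getD_of_mem_items d hmem hd []
        have hck : (PySem.Dict.mk ((k, v) :: t)).contains q.1 = true := by
          rw [pvContainsMk]; simp [hqk]
        have hgd : (PySem.Dict.mk ((k, v) :: t)).getD q.1 [] = v := by
          rw [pvGetDMkCons]; simp [hqk]
        rw [hqk] at hck hgd
        simp only [Function.comp_apply, hqk, beq_self_eq_true, if_true, hcont_t_k,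
          Bool.false_eq_true, if_false, hck, hgd, hq2]
      · have hbeq : (q.1 == k) = false := by simp [hqk]
        have hcc : (PySem.Dict.mk ((k, v) :: t)).contains q.1 = (PySem.Dict.mk t).contains q.1 := by
          rw [pvContainsMk, pvContainsMk]
          simp [List.mem_cons, hqk]
        have hgg : (PySem.Dict.mk ((k, v) :: t)).getD q.1 [] = (PySem.Dict.mk t).getD q.1 [] := by
          rw [pvGetDMkCons, if_neg (fun h => hqk h.symm)]
        simp only [Function.comp_apply, hbeq, Bool.false_eq_true, if_false, hcc, hgg]
    · have hc' : d.contains k = false := by simpa using hc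
      have hgd : d.getD k [] = [] := PySem.Dict.getD_of_not_contains _ _ hc'
      rw [PySem.Dict.items_insert_of_not_contains _ _ hc']
      have hhead : (((k, v) :: t).filter (fun p => !(d.contains p.1)))
          = (k, v) :: t.filter (fun p => !(d.contains p.1)) := by
        simp [hc']
      rw [hfeq, hhead, List.map_append, List.map_cons, List.map_cons]
      have hlast : (if (PySem.Dict.mk t).contains (k, pvSortedUnion (d.getD k []) v).1
            then ((k, pvSortedUnion (d.getD k []) v).1,
              pvSortedUnion (k, pvSortedUnion (d.getD k []) v).2 ((PySem.Dict.mk t).getD (k, pvSortedUnion (d.getD k []) v).1 []))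
            else (k, pvSortedUnion (d.getD k []) v))
          = (k, pvSortedUnion [] v) := by
        simp [hcont_t_k, hgd]
      rw [hlast]
      have hmapeq : ∀ q ∈ d.items,
          (if (PySem.Dict.mk t).contains q.1 then (q.1, pvSortedUnion q.2 ((PySem.Dict.mk t).getD q.1 [])) else q)
          = (if (PySem.Dict.mk ((k, v) :: t)).contains q.1 then (q.1, pvSortedUnion q.2 ((PySem.Dict.mk ((k, v) :: t)).getD q.1 [])) else q) := by
        intro q hq
        have hqk : q.1 ≠ k := by
          intro h
          have hmemk : k ∈ d.keys := by
            rw [← h]; exact PySem.Dict.mem_keys_of_mem_items _ hq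
          rw [← PySem.Dict.contains_iff_mem_keys] at hmemk
          rw [hc'] at hmemk; exact Bool.false_ne_true hmemk
        have hcc : (PySem.Dict.mk ((k, v) :: t)).contains q.1 = (PySem.Dict.mk t).contains q.1 := by
          rw [pvContainsMk, pvContainsMk]
          simp [List.mem_cons, hqk]
        have hgg : (PySem.Dict.mk ((k, v) :: t)).getD q.1 [] = (PySem.Dict.mk t).getD q.1 [] := by
          rw [pvGetDMkCons, if_neg (fun h => hqk h.symm)]
        rw [hcc, hgg]
      rw [List.map_congr_left hmapeq, List.append_assoc]
      rfl

-- a loop inserting distinct fresh keys appends them in order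
lemma pvFreshFold (V : String → List String) :
    ∀ (ks : List String) (d : PySem.Dict String (List String)),
    (∀ a ∈ ks, d.contains a = false) → ks.Nodup →
    (ks.foldl (fun m key => m.insert key (V key)) d).items = d.items ++ ks.map (fun k => (k, V k)) := by
  intro ks
  induction ks with
  | nil => intro d _ _; simp
  | cons k t ih =>
    intro d hfresh hnd
    have hk : d.contains k = false := hfresh k (List.mem_cons_self)
    simp only [List.foldl_cons]
    rw [ih _ (by
      intro a ha
      rw [PySem.Dict.contains_insert]
      have hak : a ≠ k := by
        intro h; exact (List.nodup_cons.mp hnd).1 (h ▸ ha)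
      simp [hak, hfresh a (List.mem_cons_of_mem _ ha)])
      (List.nodup_cons.mp hnd).2]
    rw [PySem.Dict.items_insert_of_not_contains _ _ hk]
    simp

-- ===== VERDICT (by name: the statement is the Claim_ definition above) =====
theorem merge_candidate_metadata_py_spec : Claim_equal_merge_candidate_metadata_py := by
  intro left right _ hpre
  obtain ⟨hl, hr⟩ := hpre
  unfold Spec_merge_candidate_metadata_py merge_candidate_metadata_py merge_candidate_metadata_py_alt
  simp only [pvSortDedup_eq]
  set l := left.getD [] with hldef
  set r := right.getD [] with hrdef
  simp only [List.foldl_cons, List.foldl_nil]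
  have hA1 := pvFoldIns l PySem.Dict.empty PySem.Dict.nodup_keys_empty hl
  have hA1items : (l.foldl (fun m kv => m.insert kv.1 (pvSortedUnion (m.getD kv.1 []) kv.2)) PySem.Dict.empty).items
      = l.map (fun p => (p.1, pvSortedUnion [] p.2)) := by
    rw [hA1]
    have he : (PySem.Dict.empty : PySem.Dict String (List String)).items = [] := rfl
    rw [he]
    simp [PySem.Dict.contains_empty]
  set A1 := l.foldl (fun m kv => m.insert kv.1 (pvSortedUnion (m.getD kv.1 []) kv.2)) PySem.Dict.empty with hA1def
  have hA1keys : A1.keys = l.map Prod.fst := by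
    show A1.items.map Prod.fst = _
    rw [hA1items, List.map_map]
    rfl
  have hA1nd : A1.keys.Nodup := by rw [hA1keys]; exact hl
  have hA1contains : ∀ k, A1.contains k = decide (k ∈ l.map Prod.fst) := by
    intro k
    rw [PySem.Dict.contains_eq_decide_mem_keys, hA1keys]
  rw [pvFoldIns r A1 hA1nd hr, hA1items, List.map_map]
  have hkeysnd : ((PySem.Dict.mk l).keys ++ ((PySem.Dict.mk r).keys.filter (fun k => !(PySem.Dict.mk l).contains k))).Nodup := by
    apply List.Nodup.append (by simpa [PySem.Dict.keys_mk] using hl)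
      (List.Nodup.filter _ (by simpa [PySem.Dict.keys_mk] using hr))
    intro a ha hb
    have hmemf := (List.mem_filter.mp hb).2
    rw [pvContainsMk] at hmemf
    simp only [Bool.not_eq_eq_eq_not, Bool.not_true, decide_eq_false_iff_not] at hmemf
    rw [PySem.Dict.keys_mk] at ha
    exact hmemf ha
  rw [pvFreshFold _ _ PySem.Dict.empty (fun a _ => PySem.Dict.contains_empty a) hkeysnd]
  have hempty : (PySem.Dict.empty : PySem.Dict String (List String)).items = [] := rfl
  rw [hempty, List.nil_append, PySem.Dict.keys_mk, PySem.Dict.keys_mk, List.map_append]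
  congr 1
  · -- left segment
    rw [List.map_map]
    apply List.map_congr_left
    intro p hp
    have hlget : (PySem.Dict.mk l).getD p.1 [] = p.2 :=
      PySem.Dict.getD_of_mem_items _ hp (by simpa [PySem.Dict.keys_mk] using hl) []
    simp only [Function.comp_apply]
    by_cases hcr : (PySem.Dict.mk r).contains p.1 = true
    · simp only [hcr, if_true, hlget]
      rw [pvSortedUnion_idem]
    · have hcr' : (PySem.Dict.mk r).contains p.1 = false := by simp only [Bool.not_eq_true] at hcr; exact hcr
      have hrget : (PySem.Dict.mk r).getD p.1 [] = [] := PySem.Dict.getD_of_not_contains _ _ hcr'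
      simp only [hcr', Bool.false_eq_true, if_false, hlget, hrget]
      rw [pvSortedUnion_nil_right, ← pvSortedUnion_nil]
  · -- right segment
    have hfm : (r.map Prod.fst).filter (fun k => !(PySem.Dict.mk l).contains k)
        = (r.filter (fun p => !(PySem.Dict.mk l).contains p.1)).map Prod.fst := by
      rw [List.filter_map]
      rfl
    rw [hfm, List.map_map]
    have hfc : r.filter (fun p => !(PySem.Dict.mk l).contains p.1) = r.filter (fun p => !A1.contains p.1) := by
      apply List.filter_congr
      intro p _
      rw [hA1contains, pvContainsMk]
    rw [← hfc]
    apply List.map_congr_left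
    intro p hp
    have hpmem := (List.mem_filter.mp hp).1
    have hpnotl := (List.mem_filter.mp hp).2
    rw [Bool.not_eq_eq_eq_not, Bool.not_true, pvContainsMk, decide_eq_false_iff_not] at hpnotl
    have hlget : (PySem.Dict.mk l).getD p.1 [] = [] :=
      PySem.Dict.getD_of_not_contains _ _ (by rw [pvContainsMk]; exact decide_eq_false hpnotl)
    have hrget : (PySem.Dict.mk r).getD p.1 [] = p.2 :=
      PySem.Dict.getD_of_mem_items _ hpmem (by simpa [PySem.Dict.keys_mk] using hr) []
    simp only [Function.comp_apply, hlget, hrget]
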